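-- pv_equiv track=rewrite | github.com/fispact/pypact | pypact/util/lines.py | strings_from_line
-- ===== SOURCE A (Python) =====
-- def strings_from_line(line, linetag, ignoretags=[], endtag=''):
--     """
--
--     :param line: The string representing a line
--     :param linetag: The tag to find in the line
--     :param ignoretags: The list of strings to ignore
--     :param endtag: The tag of which to stop the string
--     :return: A list of strings, without spaces or carriage returns, of string after the linetag
--
--     """
--     startindex = line.find(linetag)
--     if startindex < 0:
--         return []
--
--     endindex = len(line)
--     if endtag:
--         endindex = line.find(endtag)
--         if endindex < 0:
--             endindex = len(line)
--
--     strings = (line[startindex + len(linetag):endindex]).split()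
--
--     # trim
--     for tag in ignoretags:
--         if tag in strings:
--             strings.remove(tag)
--
--     return strings
-- ===== SOURCE B (Python) =====
-- def strings_from_line(line, linetag, ignoretags=[], endtag=''):
--     i = line.find(linetag)
--     if i < 0:
--         return []
--     j = line.find(endtag) if endtag else -1
--     seg = line[i + len(linetag):] if j < 0 else line[i + len(linetag):j]
--     counts = {}
--     for tag in ignoretags:
--         counts[tag] = counts.get(tag, 0) + 1
--     out = []
--     for tok in seg.split():
--         if counts.get(tok, 0) > 0:
--             counts[tok] -= 1
--         else:
--             out.append(tok)
--     return out
-- ===== Notes on version B (the rewrite author's own statement) =====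
-- stated objective: alternative
-- what changed: Replaces A's per-tag 'if tag in strings: strings.remove(tag)' rescans with a count dict built once over ignoretags and a single filtering pass over the tokens that decrements counts, and slices to the end of the string directly when no end tag applies.
import Mathlib
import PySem

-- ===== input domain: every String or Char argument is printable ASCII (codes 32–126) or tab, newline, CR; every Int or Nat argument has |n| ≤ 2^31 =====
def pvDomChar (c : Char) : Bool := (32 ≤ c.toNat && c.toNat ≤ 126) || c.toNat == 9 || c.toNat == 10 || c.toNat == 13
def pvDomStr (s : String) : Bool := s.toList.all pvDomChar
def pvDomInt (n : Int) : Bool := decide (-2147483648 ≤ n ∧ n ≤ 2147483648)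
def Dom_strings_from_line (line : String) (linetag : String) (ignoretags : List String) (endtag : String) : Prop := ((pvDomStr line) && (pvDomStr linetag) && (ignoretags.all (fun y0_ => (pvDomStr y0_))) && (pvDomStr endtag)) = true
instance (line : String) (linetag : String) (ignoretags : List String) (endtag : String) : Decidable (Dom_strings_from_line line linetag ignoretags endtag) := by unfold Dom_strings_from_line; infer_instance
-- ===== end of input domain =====

-- B replaces A's per-tag membership-test-and-remove loop with a count dict over ignoretags and one filtering pass over the tokens (alternative single-pass decomposition; return value proved identical).
-- ===== PORT A =====
def strings_from_line (line : String) (linetag : String) (ignoretags : List String) (endtag : String) : List String :=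
  let startindex := PySem.Str.find line linetag
  if startindex < 0 then []
  else
    let endindex :=
      if endtag ≠ "" then
        let e := PySem.Str.find line endtag
        if e < 0 then PySem.Str.len line else e
      else PySem.Str.len line
    let strings := PySem.Str.split₀ (PySem.Str.slice line (some (startindex + PySem.Str.len linetag)) (some endindex))
    ignoretags.foldl (fun ss tag => if tag ∈ ss then ss.erase tag else ss) strings

-- ===== PORT B =====
def strings_from_line_alt (line : String) (linetag : String) (ignoretags : List String) (endtag : String) : List String :=
  let i := PySem.Str.find line linetag
  if i < 0 then []
  else
    let j := if endtag ≠ "" then PySem.Str.find line endtag else -1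
    let seg :=
      if j < 0 then PySem.Str.slice line (some (i + PySem.Str.len linetag)) none
      else PySem.Str.slice line (some (i + PySem.Str.len linetag)) (some j)
    let counts := ignoretags.foldl (fun d t => d.insert t (d.getD t 0 + 1)) PySem.Dict.empty
    ((PySem.Str.split₀ seg).foldl
      (fun (st : PySem.Dict String Int × List String) tok =>
        if st.1.getD tok 0 > 0 then (st.1.insert tok (st.1.getD tok 0 - 1), st.2)
        else (st.1, st.2 ++ [tok])) (counts, ([] : List String))).2

-- ===== PRECONDITION & SPEC =====
def Spec_strings_from_line (line : String) (linetag : String) (ignoretags : List String) (endtag : String) (out : List String) : Prop := out = strings_from_line_alt line linetag ignoretags endtag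
instance (line : String) (linetag : String) (ignoretags : List String) (endtag : String) (out : List String) : Decidable (Spec_strings_from_line line linetag ignoretags endtag out) := by unfold Spec_strings_from_line; infer_instance

-- ===== CLAIM (what is proved, stated in full; the proofs are below) =====
def Claim_equal_strings_from_line : Prop := ∀ (line : String) (linetag : String) (ignoretags : List String) (endtag : String), Dom_strings_from_line line linetag ignoretags endtag → Spec_strings_from_line line linetag ignoretags endtag (strings_from_line line linetag ignoretags endtag)


-- ===== LEMMAS AND PROOFS =====

/-- Abstract "drop the first c(x) occurrences of each token x" pass, used to relate both folds. -/
def pvDropC (c : String → Int) : List String → List String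
  | [] => []
  | x :: xs => if c x > 0 then pvDropC (fun y => if y = x then c y - 1 else c y) xs
               else x :: pvDropC c xs

lemma pvDropC_nonpos (c : String → Int) (h : ∀ x, c x ≤ 0) (toks : List String) :
    pvDropC c toks = toks := by
  induction toks with
  | nil => rfl
  | cons x xs ih =>
    have : ¬ c x > 0 := by have := h x; omega
    simp [pvDropC, this, ih]

/-- B's filtering fold computes pvDropC of the dict's count function. -/
lemma pvB_fold (toks : List String) : ∀ (d : PySem.Dict String Int) (acc : List String),
    (toks.foldl
      (fun (st : PySem.Dict String Int × List String) tok =>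
        if st.1.getD tok 0 > 0 then (st.1.insert tok (st.1.getD tok 0 - 1), st.2)
        else (st.1, st.2 ++ [tok])) (d, acc)).2
    = acc ++ pvDropC (fun t => d.getD t 0) toks := by
  induction toks with
  | nil => intro d acc; simp [pvDropC]
  | cons x xs ih =>
    intro d acc
    by_cases h : d.getD x 0 > 0
    · have hc : (fun t => (d.insert x (d.getD x 0 - 1)).getD t 0)
          = (fun y => if y = x then d.getD y 0 - 1 else d.getD y 0) := by
        funext y
        rw [PySem.Dict.getD_insert]
        by_cases hy : y = x <;> simp [hy]
      simp only [List.foldl_cons, if_pos h]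
      rw [ih, hc]
      simp [pvDropC, h]
    · simp only [List.foldl_cons, if_neg h]
      rw [ih]
      simp [pvDropC, h]

/-- Bumping the count of a by one = first erasing one occurrence of a (if any). -/
lemma pvBump_erase (toks : List String) : ∀ (c : String → Int) (_ : ∀ x, 0 ≤ c x) (a : String),
    pvDropC (fun y => if y = a then c y + 1 else c y) toks
    = pvDropC c (if a ∈ toks then toks.erase a else toks) := by
  induction toks with
  | nil => intro c hc a; simp [pvDropC]
  | cons x xs ih =>
    intro c hc a
    by_cases hxa : x = a
    · subst hxa
      have hpos : (if x = x then c x + 1 else c x) > 0 := by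
        have := hc x; rw [if_pos rfl]; omega
      have hfun : (fun y => if y = x then (if y = x then c y + 1 else c y) - 1
                    else (if y = x then c y + 1 else c y)) = c := by
        funext y; by_cases hy : y = x <;> simp [hy]
      rw [pvDropC, if_pos hpos, hfun]
      simp [List.mem_cons, List.erase_cons_head]
    · have hnem : ∀ (hmem : a ∉ xs), a ∉ x :: xs := by
        intro hmem h
        rcases List.mem_cons.mp h with h1 | h2
        · exact hxa h1.symm
        · exact hmem h2
      by_cases hcx : c x > 0
      · have hpos : (if x = a then c x + 1 else c x) > 0 := by simpa [hxa] using hcx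
        have hfun : (fun y => if y = x then (if y = a then c y + 1 else c y) - 1
                      else (if y = a then c y + 1 else c y))
            = (fun y => if y = a then (if y = x then c y - 1 else c y) + 1
                      else (if y = x then c y - 1 else c y)) := by
          funext y
          by_cases hy : y = x
          · subst hy; simp [hxa]
          · by_cases hy2 : y = a
            · subst hy2; simp [hy]
            · simp [hy, hy2]
        have hc' : ∀ y, 0 ≤ (fun y => if y = x then c y - 1 else c y) y := by
          intro y; by_cases hy : y = x
          · simp only [hy]; omega
          · simpa [hy] using hc y
        rw [pvDropC, if_pos hpos, hfun, ih _ hc' a]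
        by_cases hmem : a ∈ xs
        · rw [if_pos hmem, if_pos (List.mem_cons_of_mem _ hmem),
            List.erase_cons_tail (by simp [hxa]), pvDropC, if_pos hcx]
        · rw [if_neg hmem, if_neg (hnem hmem), pvDropC, if_pos hcx]
      · have hpos : ¬ (if x = a then c x + 1 else c x) > 0 := by simpa [hxa] using hcx
        rw [pvDropC, if_neg hpos, ih _ hc a]
        by_cases hmem : a ∈ xs
        · rw [if_pos hmem, if_pos (List.mem_cons_of_mem _ hmem),
            List.erase_cons_tail (by simp [hxa]), pvDropC, if_neg hcx]
        · rw [if_neg hmem, if_neg (hnem hmem), pvDropC, if_neg hcx]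

/-- A's remove loop computes pvDropC of the ignoretags multiplicity function. -/
lemma pvA_fold (tags : List String) : ∀ (toks : List String),
    tags.foldl (fun ss tag => if tag ∈ ss then ss.erase tag else ss) toks
    = pvDropC (fun t => (tags.count t : Int)) toks := by
  induction tags with
  | nil =>
    intro toks
    simp only [List.foldl_nil]
    rw [pvDropC_nonpos _ (by intro x; simp)]
  | cons tag tags ih =>
    intro toks
    have hfun : (fun t => (((tag :: tags).count t : Nat) : Int))
        = (fun y => if y = tag then ((tags.count y : Nat) : Int) + 1
                    else ((tags.count y : Nat) : Int)) := by
      funext y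
      by_cases hy : y = tag
      · simp [hy]
      · have : ¬ tag = y := fun h => hy h.symm
        simp [hy, this]
    rw [List.foldl_cons, ih, hfun,
      pvBump_erase toks (fun t => ((tags.count t : Nat) : Int)) (by intro x; positivity) tag]

/-- B's count dict holds the multiplicities of ignoretags. -/
lemma pvCounts (tags : List String) (t : String) :
    (tags.foldl (fun d t => d.insert t (d.getD t 0 + 1)) PySem.Dict.empty).getD t 0
      = (tags.count t : Int) := by
  rw [PySem.Dict.getD_foldl_insert_add_one, PySem.Dict.getD_empty]
  simp

/-- Slicing to len(s) is slicing to the end. -/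
lemma pvSlice_len (s : String) (a : Int) (ha : 0 ≤ a) :
    PySem.Str.slice s (some a) (some (PySem.Str.len s)) = PySem.Str.slice s (some a) none := by
  apply String.toList_inj.mp
  simp only [PySem.Str.toList_slice, PySem.Chars.slice_eq_listSlice, PySem.Str.len_eq]
  rw [PySem.List.slice_toNat _ ha (by positivity), PySem.List.slice_from _ ha]
  apply List.take_of_length_le
  simp

/-- The two token-filtering loops agree on any token list. -/
lemma pvKey (ignoretags : List String) (toks : List String) :
    ignoretags.foldl (fun ss tag => if tag ∈ ss then ss.erase tag else ss) toks
    = (toks.foldl (fun (st : PySem.Dict String Int × List String) tok =>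
        if st.1.getD tok 0 > 0 then (st.1.insert tok (st.1.getD tok 0 - 1), st.2)
        else (st.1, st.2 ++ [tok]))
        (ignoretags.foldl (fun d t => d.insert t (d.getD t 0 + 1)) PySem.Dict.empty,
          ([] : List String))).2 := by
  rw [pvB_fold, List.nil_append, pvA_fold, funext (fun t => pvCounts ignoretags t)]

-- ===== VERDICT (by name: the statement is the Claim_ definition above) =====
theorem strings_from_line_spec : Claim_equal_strings_from_line := by
  unfold Claim_equal_strings_from_line
  intro line linetag ignoretags endtag _
  unfold Spec_strings_from_line
  simp only [strings_from_line, strings_from_line_alt]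
  by_cases h1 : PySem.Str.find line linetag < 0
  · rw [if_pos h1, if_pos h1]
  · rw [if_neg h1, if_neg h1]
    have ha : (0:Int) ≤ PySem.Str.find line linetag + PySem.Str.len linetag := by
      have h1' := Int.not_lt.mp h1
      rw [PySem.Str.len_eq]
      positivity
    by_cases h2 : endtag ≠ ""
    · by_cases h3 : PySem.Str.find line endtag < 0
      · rw [if_pos h2, if_pos h2, if_pos h3, if_pos h3, pvSlice_len line _ ha]
        exact pvKey ignoretags _
      · rw [if_pos h2, if_pos h2, if_neg h3, if_neg h3]
        exact pvKey ignoretags _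
    · rw [if_neg h2, if_neg h2, if_pos (show (-1:Int) < 0 by norm_num), pvSlice_len line _ ha]
      exact pvKey ignoretags _
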